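-- pv_equiv track=rewrite | github.com/isilcala/moonraker-owl | moonraker_owl/telemetry/__init__.py | build_subscription_manifest
-- ===== SOURCE A (Python) =====
-- from typing import Any, Awaitable, Callable, Dict, Iterable, Mapping, Optional, Protocol, Sequence, Set, Tuple, TYPE_CHECKING
--
-- def is_heater_object(obj_name: str) -> bool:
--     """Return True when the Moonraker object represents a temperature device.
--
--     This includes:
--     - Heaters: extruder, heater_bed, heater_generic xxx (can set target)
--     - Temperature fans: temperature_fan xxx (can set target)
--     - Temperature sensors: temperature_sensor xxx (read-only)
--     """
--     return (
--         obj_name in ("extruder", "heater_bed")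
--         or obj_name.startswith("extruder")
--         or obj_name.startswith("heater_generic")
--         or obj_name.startswith("temperature_sensor")
--         or obj_name.startswith("temperature_fan")
--     )
--
-- def heater_has_target(obj_name: str) -> bool:
--     """Return True when the temperature object supports setting a target.
--
--     Heaters and temperature fans can have their target set.
--     Temperature sensors are read-only.
--     """
--     if obj_name.startswith("temperature_sensor"):
--         return False
--     return is_heater_object(obj_name)
--
-- def build_subscription_manifest(
--     include_fields: Iterable[str], exclude_fields: Iterable[str]
-- ) -> dict[str, Optional[list[str]]]:
--     excluded_objects = {
--         _normalise_field(field)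
--         for field in exclude_fields
--         if field and "." not in field and "*" not in field
--     }
--
--     subscribe_all: set[str] = set()
--     attribute_map: dict[str, set[str]] = {}
--
--     for field in include_fields:
--         field = _normalise_field(field)
--         if not field:
--             continue
--
--         base, has_dot, attribute = field.partition(".")
--         base = base.strip()
--         if not base or base in excluded_objects:
--             continue
--
--         if not has_dot:
--             subscribe_all.add(base)
--             continue
--
--         attribute = attribute.strip()
--         if not attribute:
--             subscribe_all.add(base)
--             continue
--
--         attribute_map.setdefault(base, set()).add(attribute)
--
--     objects: dict[str, Optional[list[str]]] = {}
--     for base in sorted(subscribe_all | attribute_map.keys()):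
--         if base in subscribe_all:
--             if heater_has_target(base):
--                 # Heaters with target: subscribe to temperature and target
--                 objects[base] = ["temperature", "target"]
--             elif is_heater_object(base):
--                 # Temperature sensors: only temperature (no target)
--                 objects[base] = ["temperature"]
--             else:
--                 objects[base] = None
--         else:
--             attrs = attribute_map.get(base, set())
--             if heater_has_target(base):
--                 attrs = attrs | {"temperature", "target"}
--             elif is_heater_object(base):
--                 attrs = attrs | {"temperature"}
--             objects[base] = sorted(attrs)
--
--     return objects
--
-- def _normalise_field(field: str) -> str:
--     field = field.strip()
--     if len(field) >= 2 and field[0] == field[-1] and field[0] in {'"', "'"}: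
--         field = field[1:-1].strip()
--     return field
-- ===== SOURCE B (Python) =====
-- def is_heater_object(obj_name: str) -> bool:
--     return (
--         obj_name in ("extruder", "heater_bed")
--         or obj_name.startswith("extruder")
--         or obj_name.startswith("heater_generic")
--         or obj_name.startswith("temperature_sensor")
--         or obj_name.startswith("temperature_fan")
--     )
--
--
-- def heater_has_target(obj_name: str) -> bool:
--     if obj_name.startswith("temperature_sensor"):
--         return False
--     return is_heater_object(obj_name)
--
--
-- def _normalise_field(field: str) -> str:
--     field = field.strip()
--     if len(field) >= 2 and field[0] == field[-1] and field[0] in {'"', "'"}: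
--         field = field[1:-1].strip()
--     return field
--
--
-- def build_subscription_manifest(include_fields, exclude_fields):
--     excluded = {
--         _normalise_field(field)
--         for field in exclude_fields
--         if field and "." not in field and "*" not in field
--     }
--
--     # Parse into a flat relation: (base, attribute-or-None) per accepted field.
--     entries = []
--     for field in include_fields:
--         field = _normalise_field(field)
--         if not field:
--             continue
--         base, has_dot, attribute = field.partition(".")
--         base = base.strip()
--         if not base or base in excluded:
--             continue
--         attribute = attribute.strip()
--         entries.append((base, attribute if has_dot and attribute else None))
--
--     result = {}
--     for base in sorted({b for b, _ in entries}):
--         if any(a is None for b, a in entries if b == base):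
--             if heater_has_target(base):
--                 result[base] = ["temperature", "target"]
--             elif is_heater_object(base):
--                 result[base] = ["temperature"]
--             else:
--                 result[base] = None
--         else:
--             attrs = {a for b, a in entries if b == base}
--             if heater_has_target(base):
--                 attrs |= {"temperature", "target"}
--             elif is_heater_object(base):
--                 attrs |= {"temperature"}
--             result[base] = sorted(attrs)
--     return result
-- ===== Notes on version B (the rewrite author's own statement) =====
-- stated objective: alternative
-- what changed: B replaces A's incrementally maintained subscribe-all set and per-base attribute-set dict by a single parsing pass into a flat (base, attribute-or-None) relation, which is then grouped per sorted base (any None entry means subscribe-all) when emitting the manifest.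
import Mathlib
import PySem

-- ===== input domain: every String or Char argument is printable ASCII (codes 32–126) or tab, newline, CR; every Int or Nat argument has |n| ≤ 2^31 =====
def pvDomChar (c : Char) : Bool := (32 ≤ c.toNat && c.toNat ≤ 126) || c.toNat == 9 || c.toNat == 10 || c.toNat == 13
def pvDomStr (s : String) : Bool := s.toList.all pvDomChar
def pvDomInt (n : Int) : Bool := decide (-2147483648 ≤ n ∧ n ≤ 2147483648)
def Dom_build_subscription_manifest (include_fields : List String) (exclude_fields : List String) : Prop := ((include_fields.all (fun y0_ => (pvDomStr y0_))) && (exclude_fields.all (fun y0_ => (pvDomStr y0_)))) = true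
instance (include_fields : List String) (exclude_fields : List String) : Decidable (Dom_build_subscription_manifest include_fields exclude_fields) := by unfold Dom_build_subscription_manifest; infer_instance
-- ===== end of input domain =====

-- B parses include_fields once into a flat (base, attribute-or-None) relation and groups it per
-- sorted base at emission time, instead of A's incrementally maintained set + attribute-set dict
-- (alternative decomposition, similar cost).


-- ===== PORT A =====
-- shared module helpers (is_heater_object / heater_has_target / _normalise_field in the Python module)
def pvIsHeater (obj_name : String) : Bool :=
  (obj_name == "extruder" || obj_name == "heater_bed")
  || PySem.Str.startswith obj_name "extruder"
  || PySem.Str.startswith obj_name "heater_generic"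
  || PySem.Str.startswith obj_name "temperature_sensor"
  || PySem.Str.startswith obj_name "temperature_fan"

def pvHasTarget (obj_name : String) : Bool :=
  if PySem.Str.startswith obj_name "temperature_sensor" then false else pvIsHeater obj_name

def pvNorm (field : String) : String :=
  let f := PySem.Str.strip field
  if 2 ≤ PySem.Str.len f ∧ PySem.Str.pyGet? f 0 = PySem.Str.pyGet? f (-1)
      ∧ (PySem.Str.pyGet? f 0 = some '"' ∨ PySem.Str.pyGet? f 0 = some '\'') then
    PySem.Str.strip (PySem.Str.slice f (some 1) (some (-1)))
  else f

-- str.partition('.') ported by hand (exact: split at the FIRST '.'; returns (base, found?, after))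
def pvPartitionDot (s : String) : String × Bool × String :=
  match s.toList.span (fun c => c != '.') with
  | (_, []) => (s, false, "")
  | (pre, _ :: rest) => (String.ofList pre, true, String.ofList rest)

-- the excluded_objects set comprehension (identical expression in A and B)
def pvExcluded (exclude_fields : List String) : PySem.Set String :=
  PySem.Set.ofList
    ((exclude_fields.filter
        (fun f => f != "" && !(PySem.Str.isIn "." f) && !(PySem.Str.isIn "*" f))).map pvNorm)

-- body of A's include_fields loop
def pvStepA (excluded : PySem.Set String)
    (st : PySem.Set String × PySem.Dict String (PySem.Set String)) (field0 : String) :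
    PySem.Set String × PySem.Dict String (PySem.Set String) :=
  let field := pvNorm field0
  if field = "" then st
  else
    let p := pvPartitionDot field
    let base := PySem.Str.strip p.1
    if base = "" ∨ PySem.Set.contains excluded base then st
    else if p.2.1 = false then (PySem.Set.add st.1 base, st.2)
    else
      let attr := PySem.Str.strip p.2.2
      if attr = "" then (PySem.Set.add st.1 base, st.2)
      else (st.1, PySem.Dict.modify st.2 base PySem.Set.empty (fun s => PySem.Set.add s attr))

-- body of A's emission loop
def pvValueA (st : PySem.Set String × PySem.Dict String (PySem.Set String)) (base : String) :
    Option (List String) :=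
  if PySem.Set.contains st.1 base then
    if pvHasTarget base then some ["temperature", "target"]
    else if pvIsHeater base then some ["temperature"]
    else none
  else
    let attrs0 := PySem.Dict.getD st.2 base PySem.Set.empty
    let attrs :=
      if pvHasTarget base then PySem.Set.union attrs0 ["temperature", "target"]
      else if pvIsHeater base then PySem.Set.union attrs0 ["temperature"]
      else attrs0
    some (PySem.List.sorted attrs (fun x => x) false)

def build_subscription_manifest (include_fields : List String) (exclude_fields : List String) :
    List (String × Option (List String)) :=
  let excluded := pvExcluded exclude_fields
  let st := include_fields.foldl (pvStepA excluded) (PySem.Set.empty, PySem.Dict.empty)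
  let bases := PySem.List.sorted (PySem.Set.union st.1 (PySem.Dict.keys st.2)) (fun x => x) false
  (bases.foldl (fun d base => PySem.Dict.insert d base (pvValueA st base)) PySem.Dict.empty).items

-- ===== PORT B =====
-- B's parsing of one include field into (base, attribute-or-None), or None when skipped
def pvParse (excluded : PySem.Set String) (field0 : String) : Option (String × Option String) :=
  let field := pvNorm field0
  if field = "" then none
  else
    let p := pvPartitionDot field
    let base := PySem.Str.strip p.1
    if base = "" ∨ PySem.Set.contains excluded base then none
    else
      let attr := PySem.Str.strip p.2.2
      some (base, if p.2.1 && attr != "" then some attr else none)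

-- body of B's emission loop: group the entries of one base
def pvEmitB (entries : List (String × Option String)) (base : String) : Option (List String) :=
  if (entries.filter (fun e => e.1 == base)).any (fun e => e.2.isNone) then
    if pvHasTarget base then some ["temperature", "target"]
    else if pvIsHeater base then some ["temperature"]
    else none
  else
    let attrs0 : PySem.Set String :=
      PySem.Set.ofList ((entries.filter (fun e => e.1 == base)).filterMap (fun e => e.2))
    let attrs :=
      if pvHasTarget base then PySem.Set.union attrs0 ["temperature", "target"]
      else if pvIsHeater base then PySem.Set.union attrs0 ["temperature"]
      else attrs0
    some (PySem.List.sorted attrs (fun x => x) false)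

def build_subscription_manifest_alt (include_fields : List String) (exclude_fields : List String) :
    List (String × Option (List String)) :=
  let excluded := pvExcluded exclude_fields
  let entries := include_fields.foldl
    (fun acc f => match pvParse excluded f with | none => acc | some e => acc ++ [e])
    ([] : List (String × Option String))
  let bases := PySem.List.sorted (PySem.Set.ofList (entries.map Prod.fst)) (fun x => x) false
  bases.map (fun base => (base, pvEmitB entries base))

-- ===== PRECONDITION & SPEC =====
def Spec_build_subscription_manifest (include_fields : List String) (exclude_fields : List String) (out : List (String × Option (List String))) : Prop := out = build_subscription_manifest_alt include_fields exclude_fields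
instance (include_fields : List String) (exclude_fields : List String) (out : List (String × Option (List String))) : Decidable (Spec_build_subscription_manifest include_fields exclude_fields out) := by unfold Spec_build_subscription_manifest; infer_instance

-- ===== CLAIM (what is proved, stated in full; the proofs are below) =====
def Claim_equal_build_subscription_manifest : Prop := ∀ (include_fields : List String) (exclude_fields : List String), Dom_build_subscription_manifest include_fields exclude_fields → Spec_build_subscription_manifest include_fields exclude_fields (build_subscription_manifest include_fields exclude_fields)

-- ===== LEMMAS AND PROOFS =====

-- A's loop step, expressed through B's parse of the same field
def pvApply (st : PySem.Set String × PySem.Dict String (PySem.Set String))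
    (e : String × Option String) : PySem.Set String × PySem.Dict String (PySem.Set String) :=
  match e with
  | (b, none) => (PySem.Set.add st.1 b, st.2)
  | (b, some a) => (st.1, PySem.Dict.modify st.2 b PySem.Set.empty (fun s => PySem.Set.add s a))

theorem pv_step_parse (ex : PySem.Set String)
    (st : PySem.Set String × PySem.Dict String (PySem.Set String)) (f : String) :
    pvStepA ex st f = match pvParse ex f with | none => st | some e => pvApply st e := by
  unfold pvStepA pvParse
  by_cases h1 : pvNorm f = ""
  · simp [h1]
  · rcases hp : pvPartitionDot (pvNorm f) with ⟨b0, hd, a0⟩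
    by_cases h2 : PySem.Str.strip b0 = "" ∨ PySem.Str.strip b0 ∈ ex
    · simp [h1, hp, h2]
    · cases hd
      · simp [h1, hp, h2, pvApply]
      · by_cases h3 : PySem.Str.strip a0 = ""
        · simp [h1, hp, h2, h3, pvApply]
        · simp [h1, hp, h2, h3, pvApply]

theorem pv_fold_entries (ex : PySem.Set String) (l : List String)
    (acc : List (String × Option String)) :
    l.foldl (fun acc f => match pvParse ex f with | none => acc | some e => acc ++ [e]) acc
      = acc ++ l.filterMap (pvParse ex) := by
  induction l generalizing acc with
  | nil => simp
  | cons f t ih =>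
    cases h : pvParse ex f <;> simp [h, ih]

theorem pv_fold_step (ex : PySem.Set String) (l : List String)
    (st : PySem.Set String × PySem.Dict String (PySem.Set String)) :
    l.foldl (pvStepA ex) st = (l.filterMap (pvParse ex)).foldl pvApply st := by
  induction l generalizing st with
  | nil => rfl
  | cons f t ih =>
    simp only [List.foldl_cons, List.filterMap_cons]
    rw [pv_step_parse]
    cases h : pvParse ex f
    · simp only [ih]
    · simp only [List.foldl_cons, ih]

theorem pv_mem_fst (es : List (String × Option String))
    (st : PySem.Set String × PySem.Dict String (PySem.Set String)) (x : String) :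
    x ∈ (es.foldl pvApply st).1 ↔ x ∈ st.1 ∨ (x, (none : Option String)) ∈ es := by
  induction es generalizing st with
  | nil => simp
  | cons e t ih =>
    rcases e with ⟨b, a?⟩
    cases a? with
    | none =>
      simp only [List.foldl_cons, pvApply, ih, PySem.Set.mem_add, List.mem_cons,
        Prod.mk.injEq, and_true]
      tauto
    | some a =>
      simp only [List.foldl_cons, pvApply, ih, List.mem_cons, Prod.mk.injEq]
      simp only [reduceCtorEq, and_false, false_or]

theorem pv_mem_keys_modify {κ ν : Type} [BEq κ] [LawfulBEq κ] (d : PySem.Dict κ ν)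
    (k k' : κ) (d0 : ν) (f : ν → ν) :
    k' ∈ (d.modify k d0 f).keys ↔ k' = k ∨ k' ∈ d.keys := by
  rw [← PySem.Dict.contains_iff_mem_keys, PySem.Dict.contains_modify]
  simp [PySem.Dict.contains_iff_mem_keys]

theorem pv_mem_keys (es : List (String × Option String))
    (st : PySem.Set String × PySem.Dict String (PySem.Set String)) (x : String) :
    x ∈ (es.foldl pvApply st).2.keys ↔ x ∈ st.2.keys ∨ ∃ a, (x, some a) ∈ es := by
  induction es generalizing st with
  | nil => simp
  | cons e t ih =>
    rcases e with ⟨b, a?⟩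
    cases a? with
    | none =>
      simp only [List.foldl_cons, pvApply, ih, List.mem_cons, Prod.mk.injEq, reduceCtorEq,
        and_false, false_or]
    | some a =>
      simp only [List.foldl_cons, pvApply, ih, List.mem_cons, Prod.mk.injEq]
      rw [pv_mem_keys_modify]
      constructor
      · rintro ((h | h) | ⟨a', h⟩)
        · exact Or.inr ⟨a, Or.inl ⟨h, rfl⟩⟩
        · exact Or.inl h
        · exact Or.inr ⟨a', Or.inr h⟩
      · rintro (h | ⟨a', (⟨h1, h2⟩ | h)⟩)
        · exact Or.inl (Or.inr h)
        · exact Or.inl (Or.inl h1)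
        · exact Or.inr ⟨a', h⟩

theorem pv_getD (es : List (String × Option String))
    (st : PySem.Set String × PySem.Dict String (PySem.Set String)) (b : String) :
    (es.foldl pvApply st).2.getD b PySem.Set.empty
      = ((es.filter (fun e => e.1 == b)).filterMap (fun e => e.2)).foldl PySem.Set.add
          (st.2.getD b PySem.Set.empty) := by
  induction es generalizing st with
  | nil => simp
  | cons e t ih =>
    rcases e with ⟨b', a?⟩
    cases a? with
    | none =>
      by_cases hb : b' == b <;>
        simp only [List.foldl_cons, pvApply, ih, List.filter_cons, hb] <;> simp
    | some a =>
      by_cases hb : b' = b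
      · subst hb
        simp only [List.foldl_cons, pvApply, ih, List.filter_cons, beq_self_eq_true,
          if_true, List.filterMap_cons, PySem.Dict.getD_modify_self, List.foldl_cons]
      · have hbne : (b' == b) = false := by simp [hb]
        simp only [List.foldl_cons, pvApply, ih, List.filter_cons, hbne, if_false,
          Bool.false_eq_true]
        rw [PySem.Dict.getD_modify_of_ne st.2 PySem.Set.empty _ (Ne.symm hb)]

theorem pv_nodup_fst (es : List (String × Option String))
    (st : PySem.Set String × PySem.Dict String (PySem.Set String)) (h : st.1.Nodup) :
    (es.foldl pvApply st).1.Nodup := by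
  induction es generalizing st with
  | nil => exact h
  | cons e t ih =>
    rcases e with ⟨b, a?⟩
    cases a? with
    | none => exact ih _ (PySem.Set.nodup_add st.1 b h)
    | some a => exact ih _ h

theorem pv_nodup_keys (es : List (String × Option String))
    (st : PySem.Set String × PySem.Dict String (PySem.Set String)) (h : st.2.keys.Nodup) :
    (es.foldl pvApply st).2.keys.Nodup := by
  induction es generalizing st with
  | nil => exact h
  | cons e t ih =>
    rcases e with ⟨b, a?⟩
    cases a? with
    | none => exact ih _ h
    | some a =>
      apply ih
      show (st.2.modify b PySem.Set.empty _).keys.Nodup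
      rw [PySem.Dict.keys_modify]
      exact PySem.Dict.nodup_keys_insert _ _ _ h

-- ===== VERDICT (by name: the statement is the Claim_ definition above) =====
theorem build_subscription_manifest_spec : Claim_equal_build_subscription_manifest := by
  intro inc exc _
  unfold Spec_build_subscription_manifest
  simp only [build_subscription_manifest, build_subscription_manifest_alt]
  rw [pv_fold_entries, pv_fold_step, List.nil_append]
  generalize List.filterMap (pvParse (pvExcluded exc)) inc = E
  generalize hS : List.foldl pvApply (PySem.Set.empty, PySem.Dict.empty) E = S
  have hnd1 : S.1.Nodup := by rw [← hS]; exact pv_nodup_fst E _ List.nodup_nil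
  have hndk : S.2.keys.Nodup := by
    rw [← hS]; exact pv_nodup_keys E _ (by simp [PySem.Dict.keys_empty])
  have hfst : ∀ x, x ∈ S.1 ↔ (x, (none : Option String)) ∈ E := by
    intro x; rw [← hS, pv_mem_fst]; simp
  have hkeys : ∀ x, x ∈ S.2.keys ↔ ∃ a, (x, some a) ∈ E := by
    intro x; rw [← hS, pv_mem_keys]; simp [PySem.Dict.keys_empty]
  have hbases : PySem.List.sorted (PySem.Set.union S.1 S.2.keys) (fun x => x) false
      = PySem.List.sorted (PySem.Set.ofList (E.map Prod.fst)) (fun x => x) false := by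
    apply PySem.List.sorted_eq_sorted_of_perm _ _ _ (fun a b hab => hab)
    apply List.perm_of_nodup_nodup_toFinset_eq (PySem.Set.nodup_union _ _ hnd1)
      (PySem.Set.nodup_ofList _)
    ext x
    simp only [List.mem_toFinset, PySem.Set.mem_union, PySem.Set.mem_ofList, List.mem_map,
      hfst, hkeys]
    constructor
    · rintro (h | ⟨a, h⟩)
      · exact ⟨(x, none), h, rfl⟩
      · exact ⟨(x, some a), h, rfl⟩
    · rintro ⟨⟨b, a?⟩, h, rfl⟩
      cases a? with
      | none => exact Or.inl h
      | some a => exact Or.inr ⟨a, h⟩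
  rw [hbases]
  have hbnd : (PySem.List.sorted (PySem.Set.ofList (E.map Prod.fst)) (fun x => x) false).Nodup := by
    exact ((PySem.List.sorted_perm _ _ _).nodup_iff).mpr (PySem.Set.nodup_ofList _)
  rw [PySem.Dict.items_foldl_insert_fresh _ (fun a => a) (fun a => pvValueA S a) PySem.Dict.empty
    (fun a _ => PySem.Dict.contains_empty a) (by simpa [List.map_id'] using hbnd)]
  have hempty : (PySem.Dict.empty : PySem.Dict String (Option (List String))).items = [] := rfl
  rw [hempty, List.nil_append]
  apply List.map_congr_left
  intro b _
  have hcond : PySem.Set.contains S.1 b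
      = (E.filter (fun e => e.1 == b)).any (fun e => e.2.isNone) := by
    rw [Bool.eq_iff_iff, PySem.Set.contains_iff, hfst, List.any_eq_true]
    constructor
    · intro h
      exact ⟨(b, none), by simp [List.mem_filter, h], rfl⟩
    · rintro ⟨⟨b', a?⟩, hm, hn⟩
      rw [List.mem_filter] at hm
      cases a? with
      | none =>
        have : b' = b := by simpa using hm.2
        subst this; exact hm.1
      | some a => simp at hn
  have hattrs : PySem.Dict.getD S.2 b PySem.Set.empty
      = PySem.Set.ofList ((E.filter (fun e => e.1 == b)).filterMap (fun e => e.2)) := by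
    rw [← hS, pv_getD, PySem.Set.ofList_eq_foldl]
    simp
  simp only [pvValueA, pvEmitB, hcond, hattrs]
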